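-- pv_equiv track=rewrite | github.com/tugrul-acar/HU-CS-BBM103 | HU-CS-BBM103/Assignments/As-4/assignment4.py | bombscore
-- ===== SOURCE A (Python) =====
-- def bombscore(satır = [],colon= []):
--     score1 = 0
--     for i in satır:
--         if i == "B":
--             score1 += 9
--         if i == "G":
--             score1 += 8
--         if i == "W":
--             score1 += 7
--         if i == "Y":
--             score1 += 6
--         if i== "R":
--             score1 += 5
--         if i == "P":
--             score1 += 4
--         if i == "O":
--             score1 += 3
--         if i == "D":
--             score1 += 2
--         if i == "F":
--             score1 += 1
--     for i in colon:
--         if i == "B":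
--             score1 += 9
--         if i == "G":
--             score1 += 8
--         if i == "W":
--             score1 += 7
--         if i == "Y":
--             score1 += 6
--         if i == "R":
--             score1 += 5
--         if i == "P":
--             score1 += 4
--         if i == "O":
--             score1 += 3
--         if i == "D":
--             score1 += 2
--         if i == "F":
--             score1 += 1
--     return score1
-- ===== SOURCE B (Python) =====
-- _WEIGHTS = {'B': 9, 'G': 8, 'W': 7, 'Y': 6, 'R': 5, 'P': 4, 'O': 3, 'D': 2, 'F': 1}
--
-- def bombscore(satır=[], colon=[]):
--     # Phase 1: aggregate a frequency table over both inputs.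
--     counts = {}
--     for c in satır + colon:
--         counts[c] = counts.get(c, 0) + 1
--     # Phase 2: weight the 9 known colors; unknown characters contribute 0.
--     return sum(w * counts.get(c, 0) for c, w in _WEIGHTS.items())
-- ===== Notes on version B (the rewrite author's own statement) =====
-- stated objective: alternative
-- what changed: Replaced the two per-element 9-way if-chains with a two-phase aggregate-then-weight design: one counting pass builds a frequency table over both lists, then a second pass over the fixed 9-entry weights table sums weight*count.
import Mathlib
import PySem

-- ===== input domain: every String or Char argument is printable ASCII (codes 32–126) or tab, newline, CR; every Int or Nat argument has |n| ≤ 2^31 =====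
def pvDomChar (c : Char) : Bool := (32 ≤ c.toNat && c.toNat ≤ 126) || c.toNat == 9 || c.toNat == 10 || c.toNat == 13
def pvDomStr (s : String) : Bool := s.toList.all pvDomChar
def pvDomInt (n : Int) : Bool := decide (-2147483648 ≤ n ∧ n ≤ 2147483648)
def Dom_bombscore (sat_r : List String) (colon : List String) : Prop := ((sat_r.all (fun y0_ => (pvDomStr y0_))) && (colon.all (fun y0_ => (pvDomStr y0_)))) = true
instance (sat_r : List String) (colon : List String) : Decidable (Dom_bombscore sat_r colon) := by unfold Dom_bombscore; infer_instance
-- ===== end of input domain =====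

-- B replaces A's two per-element 9-way if-chains by one counting pass building a
-- frequency table, followed by a pass over a fixed 9-entry weights table (alternative decomposition).

-- ===== PORT A =====
-- A's loop body: nine independent `if` checks, each adding its weight to the accumulator.
def bombscoreStep (s : Int) (i : String) : Int :=
  (((((((((s + (if i = "B" then 9 else 0))
    + (if i = "G" then 8 else 0))
    + (if i = "W" then 7 else 0))
    + (if i = "Y" then 6 else 0))
    + (if i = "R" then 5 else 0))
    + (if i = "P" then 4 else 0))
    + (if i = "O" then 3 else 0))
    + (if i = "D" then 2 else 0))
    + (if i = "F" then 1 else 0))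

def bombscore (sat_r : List String) (colon : List String) : Int :=
  let score1 : Int := 0
  let score1 := sat_r.foldl bombscoreStep score1
  let score1 := colon.foldl bombscoreStep score1
  score1

-- ===== PORT B =====
def bombWeights : List (String × Int) :=
  [("B", 9), ("G", 8), ("W", 7), ("Y", 6), ("R", 5), ("P", 4), ("O", 3), ("D", 2), ("F", 1)]

def bombscore_alt (sat_r : List String) (colon : List String) : Int :=
  -- Phase 1: counts[c] = counts.get(c, 0) + 1 over satır + colon
  let counts : PySem.Dict String Int :=
    (sat_r ++ colon).foldl (fun d x => d.insert x (d.getD x 0 + 1)) PySem.Dict.empty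
  -- Phase 2: sum(w * counts.get(c, 0) for c, w in _WEIGHTS.items())
  bombWeights.foldl (fun acc p => acc + p.2 * counts.getD p.1 0) 0

-- ===== PRECONDITION & SPEC =====
def Spec_bombscore (sat_r : List String) (colon : List String) (out : Int) : Prop := out = bombscore_alt sat_r colon
instance (sat_r : List String) (colon : List String) (out : Int) : Decidable (Spec_bombscore sat_r colon out) := by unfold Spec_bombscore; infer_instance

-- ===== CLAIM (what is proved, stated in full; the proofs are below) =====
def Claim_equal_bombscore : Prop := ∀ (sat_r : List String) (colon : List String), Dom_bombscore sat_r colon → Spec_bombscore sat_r colon (bombscore sat_r colon)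

-- ===== LEMMAS AND PROOFS =====

-- pointwise weight of one element (sum of A's nine conditional additions)
def bombW (x : String) : Int :=
  9 * (if x = "B" then 1 else 0) + 8 * (if x = "G" then 1 else 0) + 7 * (if x = "W" then 1 else 0)
   + 6 * (if x = "Y" then 1 else 0) + 5 * (if x = "R" then 1 else 0) + 4 * (if x = "P" then 1 else 0)
   + 3 * (if x = "O" then 1 else 0) + 2 * (if x = "D" then 1 else 0) + 1 * (if x = "F" then 1 else 0)

-- the weighted-count total over the 9-entry table
def bombTotal (l : List String) : Int :=
  9 * (l.count "B" : Int) + 8 * (l.count "G" : Int) + 7 * (l.count "W" : Int)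
   + 6 * (l.count "Y" : Int) + 5 * (l.count "R" : Int) + 4 * (l.count "P" : Int)
   + 3 * (l.count "O" : Int) + 2 * (l.count "D" : Int) + 1 * (l.count "F" : Int)

theorem bomb_ite_factor (c : Prop) [Decidable c] (k : Int) :
    (if c then k else 0) = k * (if c then 1 else 0) := by
  split <;> ring

theorem bombStep_eq (s : Int) (x : String) : bombscoreStep s x = s + bombW x := by
  simp only [bombscoreStep, bombW]
  rw [bomb_ite_factor (x = "B") 9, bomb_ite_factor (x = "G") 8, bomb_ite_factor (x = "W") 7,
    bomb_ite_factor (x = "Y") 6, bomb_ite_factor (x = "R") 5, bomb_ite_factor (x = "P") 4,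
    bomb_ite_factor (x = "O") 3, bomb_ite_factor (x = "D") 2]
  ring

theorem bombTotal_cons (x : String) (t : List String) :
    bombTotal (x :: t) = bombW x + bombTotal t := by
  simp only [bombTotal, List.count_cons, bombW]
  push_cast
  simp only [beq_iff_eq]
  ring

theorem bombscore_foldl_eq (l : List String) (s : Int) :
    l.foldl bombscoreStep s = s + bombTotal l := by
  induction l generalizing s with
  | nil => simp [bombTotal]
  | cons x t ih => rw [List.foldl_cons, bombStep_eq, ih, bombTotal_cons]; ring

theorem bombscore_alt_eq (sat_r colon : List String) :
    bombscore_alt sat_r colon = bombTotal (sat_r ++ colon) := by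
  simp only [bombscore_alt, bombWeights, List.foldl_cons, List.foldl_nil,
    PySem.Dict.getD_foldl_insert_add_one, PySem.Dict.getD_empty, bombTotal]
  ring

-- ===== VERDICT (by name: the statement is the Claim_ definition above) =====
theorem bombscore_spec : Claim_equal_bombscore := by
  intro sat_r colon _
  show bombscore sat_r colon = bombscore_alt sat_r colon
  simp only [bombscore, bombscore_foldl_eq, bombscore_alt_eq, bombTotal, List.count_append]
  push_cast
  ring
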